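-- pv_equiv track=rewrite | github.com/yavuzgulesen/SMP-using-AI | LocalSearchMethods.py | new_NS
-- ===== SOURCE A (Python) =====
-- def new_NS(M, bps, n1, n2):
--     men_in_bps = []
--     wom_in_bps = []
--     for bp in bps:
--         men_in_bps.append(bp[0]) if bp[0] not in men_in_bps else men_in_bps
--         wom_in_bps.append(bp[1]) if bp[1] not in wom_in_bps else wom_in_bps
--
--     ns = 0
--     for i in range(n1):
--         if M[i] == -1 and i not in men_in_bps:
--             ns += 1
--     for j in range(n2):
--         if M[n1+j] == -1 and j not in wom_in_bps:
--             ns+=1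
--     return ns
-- ===== SOURCE B (Python) =====
-- def new_NS(M, bps, n1, n2):
--     total = sum(1 for i in range(n1) if M[i] == -1)
--     total += sum(1 for j in range(n2) if M[n1 + j] == -1)
--     men = {bp[0] for bp in bps}
--     wom = {bp[1] for bp in bps}
--     total -= sum(1 for m in men if 0 <= m < n1 and M[m] == -1)
--     total -= sum(1 for w in wom if 0 <= w < n2 and M[n1 + w] == -1)
--     return total
-- ===== Notes on version B (the rewrite author's own statement) =====
-- stated objective: alternative
-- what changed: Instead of testing each agent for membership in incrementally-deduplicated blocking-pair lists, B counts all unmatched agents directly and then subtracts corrections by iterating over the deduplicated sets of blocking-pair members, inverting the traversal.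
import Mathlib
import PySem

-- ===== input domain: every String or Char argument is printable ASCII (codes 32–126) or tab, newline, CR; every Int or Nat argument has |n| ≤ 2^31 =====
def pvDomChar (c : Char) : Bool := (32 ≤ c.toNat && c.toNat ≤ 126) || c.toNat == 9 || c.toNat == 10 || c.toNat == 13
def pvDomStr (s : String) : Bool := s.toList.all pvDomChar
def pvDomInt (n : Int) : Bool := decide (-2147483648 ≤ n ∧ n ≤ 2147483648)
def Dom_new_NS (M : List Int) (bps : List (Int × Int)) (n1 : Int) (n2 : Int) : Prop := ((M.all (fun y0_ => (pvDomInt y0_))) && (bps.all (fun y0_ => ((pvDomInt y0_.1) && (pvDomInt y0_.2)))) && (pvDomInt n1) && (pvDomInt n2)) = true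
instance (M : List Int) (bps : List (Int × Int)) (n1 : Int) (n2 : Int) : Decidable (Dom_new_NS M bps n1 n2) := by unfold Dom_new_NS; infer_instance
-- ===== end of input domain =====

-- B inverts the traversal: it counts all unmatched agents once and subtracts corrections over the
-- deduplicated sets of blocking-pair members, instead of a per-agent membership test (objective: alternative).


-- ===== PORT A =====
-- the two 'append if not in' updates are exactly PySem.Set.add (conditional append keeping first occurrences)
def new_NS (M : List Int) (bps : List (Int × Int)) (n1 : Int) (n2 : Int) : Int :=
  let mw := bps.foldl
    (fun (acc : PySem.Set Int × PySem.Set Int) bp =>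
      (PySem.Set.add acc.1 bp.1, PySem.Set.add acc.2 bp.2)) ([], [])
  let ns : Int := (PySem.List.pyRange 0 n1 1).foldl
    (fun ns i => if (PySem.List.pyGetD M i 0 == -1) && !(decide (i ∈ mw.1)) then ns + 1 else ns) 0
  (PySem.List.pyRange 0 n2 1).foldl
    (fun ns j => if (PySem.List.pyGetD M (n1 + j) 0 == -1) && !(decide (j ∈ mw.2)) then ns + 1 else ns) ns

-- ===== PORT B =====
-- sum(1 for x in l if p(x)) is ported as (l.countP p : Int)
def new_NS_alt (M : List Int) (bps : List (Int × Int)) (n1 : Int) (n2 : Int) : Int :=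
  let total : Int := ((PySem.List.pyRange 0 n1 1).countP (fun i => PySem.List.pyGetD M i 0 == -1) : Int)
  let total := total + ((PySem.List.pyRange 0 n2 1).countP (fun j => PySem.List.pyGetD M (n1 + j) 0 == -1) : Int)
  let men : PySem.Set Int := PySem.Set.ofList (bps.map (fun bp => bp.1))
  let wom : PySem.Set Int := PySem.Set.ofList (bps.map (fun bp => bp.2))
  let total := total - (men.countP (fun m => decide (0 ≤ m) && decide (m < n1) && (PySem.List.pyGetD M m 0 == -1)) : Int)
  let total := total - (wom.countP (fun w => decide (0 ≤ w) && decide (w < n2) && (PySem.List.pyGetD M (n1 + w) 0 == -1)) : Int)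
  total

-- ===== PRECONDITION & SPEC =====
-- Pre_ excludes exactly the inputs on which the Python A raises IndexError (an index of M out of
-- Python's valid [-len, len) range); A returns on every other input.
def Pre_new_NS (M : List Int) (bps : List (Int × Int)) (n1 : Int) (n2 : Int) : Prop :=
  (0 < n1 → n1 ≤ (M.length : Int)) ∧
  (0 < n2 → -(M.length : Int) ≤ n1 ∧ n1 + n2 ≤ (M.length : Int))
instance (M : List Int) (bps : List (Int × Int)) (n1 : Int) (n2 : Int) : Decidable (Pre_new_NS M bps n1 n2) := by unfold Pre_new_NS; infer_instance
def pvWitness_new_NS : List Int × (List (Int × Int)) × Int × Int := ([-1, 0, -1], [(0, 0)], 2, 1)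

def Spec_new_NS (M : List Int) (bps : List (Int × Int)) (n1 : Int) (n2 : Int) (out : Int) : Prop := out = new_NS_alt M bps n1 n2
instance (M : List Int) (bps : List (Int × Int)) (n1 : Int) (n2 : Int) (out : Int) : Decidable (Spec_new_NS M bps n1 n2 out) := by unfold Spec_new_NS; infer_instance

-- ===== CLAIM (what is proved, stated in full; the proofs are below) =====
def Claim_equal_new_NS : Prop := ∀ (M : List Int) (bps : List (Int × Int)) (n1 : Int) (n2 : Int), Dom_new_NS M bps n1 n2 → Pre_new_NS M bps n1 n2 → Spec_new_NS M bps n1 n2 (new_NS M bps n1 n2)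

-- ===== LEMMAS AND PROOFS =====

-- two nodup lists: counting x ∈ l₁ with (p x ∧ x ∈ l₂) equals counting x ∈ l₂ with (x ∈ l₁ ∧ p x)
theorem countP_exchange {α : Type} [DecidableEq α] (l₁ l₂ : List α) (p : α → Bool)
    (h₁ : l₁.Nodup) (h₂ : l₂.Nodup) :
    l₁.countP (fun x => p x && decide (x ∈ l₂)) = l₂.countP (fun x => decide (x ∈ l₁) && p x) := by
  rw [List.countP_eq_length_filter, List.countP_eq_length_filter]
  apply List.Perm.length_eq
  rw [List.perm_ext_iff_of_nodup (h₁.filter _) (h₂.filter _)]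
  intro a
  simp only [List.mem_filter, Bool.and_eq_true, decide_eq_true_eq]
  tauto

-- countP splits along a second predicate
theorem countP_split {α : Type} (l : List α) (p q : α → Bool) :
    l.countP p = l.countP (fun x => p x && q x) + l.countP (fun x => p x && !(q x)) := by
  induction l with
  | nil => simp
  | cons a t ih =>
    simp only [List.countP_cons]
    cases p a <;> cases q a <;> simp <;> omega

-- one side of A's count equals the total count minus the correction over the dedup set
theorem count_not_mem_eq {S : List Int} (hS : S.Nodup) (n : Int) (u : Int → Bool) :
    ((PySem.List.pyRange 0 n 1).countP (fun i => u i && !(decide (i ∈ S))) : Int)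
      = ((PySem.List.pyRange 0 n 1).countP u : Int)
        - (S.countP (fun m => decide (0 ≤ m) && decide (m < n) && u m) : Int) := by
  have hsplit := countP_split (PySem.List.pyRange 0 n 1) u (fun i => decide (i ∈ S))
  have hex := countP_exchange (PySem.List.pyRange 0 n 1) S u (PySem.List.nodup_pyRange_one 0 n) hS
  have hcg : S.countP (fun x => decide (x ∈ PySem.List.pyRange 0 n 1) && u x)
      = S.countP (fun m => decide (0 ≤ m) && decide (m < n) && u m) := by
    apply List.countP_congr
    intro x _
    simp [PySem.List.mem_pyRange_one, Bool.and_assoc]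
  rw [hex, hcg] at hsplit
  omega

theorem new_NS_eq_alt (M : List Int) (bps : List (Int × Int)) (n1 n2 : Int) :
    new_NS M bps n1 n2 = new_NS_alt M bps n1 n2 := by
  unfold new_NS new_NS_alt
  rw [PySem.List.foldl_prod_mk (f := fun (s : PySem.Set Int) (bp : Int × Int) => PySem.Set.add s bp.1) (g := fun (s : PySem.Set Int) (bp : Int × Int) => PySem.Set.add s bp.2)]
  have hm : bps.foldl (fun s bp => PySem.Set.add s bp.1) ([] : PySem.Set Int)
      = PySem.Set.ofList (bps.map (fun bp => bp.1)) := by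
    rw [PySem.Set.ofList_eq_foldl, List.foldl_map]
  have hw : bps.foldl (fun s bp => PySem.Set.add s bp.2) ([] : PySem.Set Int)
      = PySem.Set.ofList (bps.map (fun bp => bp.2)) := by
    rw [PySem.Set.ofList_eq_foldl, List.foldl_map]
  simp only [hm, hw, PySem.List.foldl_if_add_one]
  rw [count_not_mem_eq (PySem.Set.nodup_ofList _) n1 (fun i => PySem.List.pyGetD M i 0 == -1),
      count_not_mem_eq (PySem.Set.nodup_ofList _) n2 (fun j => PySem.List.pyGetD M (n1 + j) 0 == -1)]
  ring

-- ===== VERDICT (by name: the statement is the Claim_ definition above) =====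
theorem new_NS_spec : Claim_equal_new_NS := by
  intro M bps n1 n2 _ _
  unfold Spec_new_NS
  exact new_NS_eq_alt M bps n1 n2
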